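-- pv_equiv track=rewrite | github.com/kmicpaps/lead_gen | execution/verify_country.py | get_domain_tld
-- ===== SOURCE A (Python) =====
-- COMPOUND_TLDS = {".co.uk", ".co.nz", ".com.au", ".co.za", ".co.jp", ".co.kr", ".com.br", ".co.in"}
--
-- def get_domain_tld(domain):
--     """
--     Extract effective TLD from a domain.
--     Handles compound TLDs: 'company.co.uk' -> '.co.uk'
--     """
--     if not domain:
--         return ""
--     domain = domain.lower().strip()
--     # Check compound TLDs first
--     for ctld in COMPOUND_TLDS:
--         if domain.endswith(ctld):
--             return ctld
--     # Simple TLD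
--     parts = domain.rsplit(".", 1)
--     if len(parts) == 2:
--         return "." + parts[1]
--     return ""
-- ===== SOURCE B (Python) =====
-- COMPOUND_TLDS = {".co.uk", ".co.nz", ".com.au", ".co.za", ".co.jp", ".co.kr", ".com.br", ".co.in"}
--
-- def get_domain_tld(domain):
--     """
--     Extract effective TLD from a domain.
--     Handles compound TLDs: 'company.co.uk' -> '.co.uk'
--     """
--     d = domain.lower().strip()
--     i = d.rfind(".")
--     if i == -1:
--         return ""
--     j = d.rfind(".", 0, i)
--     if j != -1:
--         cand = d[j:]
--         if cand in COMPOUND_TLDS: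
--             return cand
--     return d[i:]
-- ===== Notes on version B (the rewrite author's own statement) =====
-- stated objective: alternative
-- what changed: Replaces A's endswith scan over all compound TLDs plus an rsplit by pure index arithmetic: two rfind calls locate the last and second-to-last dots and the answer is read off as a slice d[j:] checked by one set membership (or d[i:] as the simple-TLD fallback).
import Mathlib
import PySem

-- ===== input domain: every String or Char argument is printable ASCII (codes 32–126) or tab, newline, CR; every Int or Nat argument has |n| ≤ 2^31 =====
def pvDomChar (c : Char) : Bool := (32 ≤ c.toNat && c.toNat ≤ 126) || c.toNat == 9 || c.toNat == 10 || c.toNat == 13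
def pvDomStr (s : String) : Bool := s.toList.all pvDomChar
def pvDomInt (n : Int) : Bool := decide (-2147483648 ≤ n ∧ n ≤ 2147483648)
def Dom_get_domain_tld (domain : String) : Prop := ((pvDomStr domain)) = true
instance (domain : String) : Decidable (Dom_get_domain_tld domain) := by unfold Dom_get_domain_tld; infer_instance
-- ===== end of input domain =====

-- B replaces A's endswith scan over all compound TLDs plus an rsplit by index arithmetic:
-- two rfind calls locate the last two dots and the answer is a slice from one of them
-- (objective: alternative; same asymptotic cost).

-- ===== PORT A =====
-- the module constant COMPOUND_TLDS (a Python set literal; its iteration order is immaterial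
-- here because no element is a suffix of another, so at most one endswith test can succeed)
def pvCtlds : List (List Char) :=
  [['.','c','o','.','u','k'], ['.','c','o','.','n','z'], ['.','c','o','m','.','a','u'],
   ['.','c','o','.','z','a'], ['.','c','o','.','j','p'], ['.','c','o','.','k','r'],
   ['.','c','o','m','.','b','r'], ['.','c','o','.','i','n']]

def pvNotDot (c : Char) : Bool := c ≠ '.'

-- hand port of s.rsplit(".", 1) (PySem has no rsplit): split the reversed list at its first dot;
-- exact: Python returns [s] when '.' is absent, else the pieces before/after the LAST '.'
def pvRsplitDot1 (t : List Char) : List (List Char) :=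
  let p := t.reverse.span pvNotDot
  match p.2 with
  | [] => [t]
  | _ :: b => [b.reverse, p.1.reverse]

def get_domain_tld (domain : String) : String :=
  if domain.toList = [] then ""          -- if not domain: return ""
  else
    let d := PySem.Chars.strip (PySem.Chars.lower domain.toList)
    match pvCtlds.find? (fun c => PySem.Chars.endswith d c) with   -- for ctld in COMPOUND_TLDS: if domain.endswith(ctld): return ctld
    | some c => String.ofList c
    | none =>
      match pvRsplitDot1 d with              -- parts = domain.rsplit(".", 1)
      | [_, p1] => String.ofList ('.' :: p1) -- if len(parts) == 2: return "." + parts[1]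
      | _ => ""

-- ===== PORT B =====
-- B's copy of the module constant, as a Python set
def pvCompoundB : List (List Char) :=
  PySem.Set.ofList
    ([".co.uk", ".co.nz", ".com.au", ".co.za", ".co.jp", ".co.kr", ".com.br", ".co.in"].map
      String.toList)

-- hand port of s.rfind(".") restricted to the prefix l (Python's d.rfind(".", 0, i) is
-- rfind on d[:i]): the HIGHEST index of '.' in l, none when absent; exact, via the first
-- match in the reversed list
def pvRFindDot (l : List Char) : Option Nat :=
  (l.reverse.findIdx? (fun c => c == '.')).map (fun k => l.length - 1 - k)

def get_domain_tld_alt (domain : String) : String :=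
  let d := PySem.Chars.strip (PySem.Chars.lower domain.toList)
  match pvRFindDot d with                    -- i = d.rfind("."); if i == -1: return ""
  | none => ""
  | some i =>
    match pvRFindDot (d.take i) with         -- j = d.rfind(".", 0, i)
    | some j =>
      let cand := d.drop j                   -- cand = d[j:]
      if pvCompoundB.contains cand then String.ofList cand   -- if cand in COMPOUND_TLDS
      else String.ofList (d.drop i)          -- return d[i:]
    | none => String.ofList (d.drop i)

-- ===== PRECONDITION & SPEC =====
def Spec_get_domain_tld (domain : String) (out : String) : Prop := out = get_domain_tld_alt domain
instance (domain : String) (out : String) : Decidable (Spec_get_domain_tld domain out) := by unfold Spec_get_domain_tld; infer_instance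

-- ===== CLAIM (what is proved, stated in full; the proofs are below) =====
def Claim_equal_get_domain_tld : Prop := ∀ (domain : String), Dom_get_domain_tld domain → Spec_get_domain_tld domain (get_domain_tld domain)

-- ===== LEMMAS AND PROOFS =====

-- findIdx? through the takeWhile/dropWhile decomposition
lemma pv_findIdx (l : List Char) :
    l.findIdx? (fun c => c == '.') =
      match l.dropWhile pvNotDot with
      | [] => none
      | _ :: _ => some (l.takeWhile pvNotDot).length := by
  induction l with
  | nil => rfl
  | cons c l ih =>
    by_cases h : c = '.'
    · subst h
      simp [List.findIdx?_cons, pvNotDot]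
    · have hb : (c == '.') = false := by simpa using h
      have hn : pvNotDot c = true := by simpa [pvNotDot] using h
      simp only [List.findIdx?_cons, hb, List.dropWhile_cons, List.takeWhile_cons, hn,
        if_true, ih]
      cases l.dropWhile pvNotDot <;> simp
  
-- a dot-free block before a '.' is rigid under the prefix order
lemma pv_pref_split (u v s s' : List Char) (hu : '.' ∉ u) (hv : '.' ∉ v) :
    (u ++ '.' :: s <+: v ++ '.' :: s') ↔ (u = v ∧ s <+: s') := by
  induction u generalizing v with
  | nil =>
    cases v with
    | nil => simp
    | cons w v' =>
      simp only [List.nil_append, List.cons_append, List.cons_prefix_cons]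
      constructor
      · rintro ⟨h, -⟩
        exact absurd (h ▸ List.mem_cons_self) hv
      · rintro ⟨h, -⟩; cases h
  | cons x u' ih =>
    have hu' : '.' ∉ u' := fun h => hu (List.mem_cons_of_mem _ h)
    cases v with
    | nil =>
      simp only [List.cons_append, List.nil_append, List.cons_prefix_cons]
      constructor
      · rintro ⟨h, -⟩
        exact absurd (h.symm ▸ List.mem_cons_self) hu
      · rintro ⟨h, -⟩; cases h
    | cons w v' =>
      have hv' : '.' ∉ v' := fun h => hv (List.mem_cons_of_mem _ h)
      simp only [List.cons_append, List.cons_prefix_cons, List.cons.injEq]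
      rw [ih v' hu' hv']
      tauto

lemma pv_shape_eq (m n u v : List Char) (hm : '.' ∉ m) (hu : '.' ∉ u) :
    (('.' :: m ++ '.' :: n : List Char) = '.' :: u ++ '.' :: v) ↔ (m = u ∧ n = v) := by
  constructor
  · intro h
    simp only [List.cons_append, List.cons.injEq, true_and] at h
    have h1 : m ++ '.' :: n <+: u ++ '.' :: v := h ▸ List.prefix_refl _
    rw [pv_pref_split m u n v hm hu] at h1
    refine ⟨h1.1, ?_⟩
    rw [h1.1] at h
    have := List.append_cancel_left h
    injection this
  · rintro ⟨h1, h2⟩; rw [h1, h2]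

-- the suffix test against a compound TLD, on a string whose last two labels are exposed
lemma pv_ends_iff (a a2 b3 : List Char) (ha : '.' ∉ a) (ha2 : '.' ∉ a2) (c : List Char)
    (hc : c ∈ pvCtlds) :
    PySem.Chars.endswith ((b3.reverse ++ '.' :: a2.reverse) ++ '.' :: a.reverse) c
      = (('.' :: (a2.reverse ++ '.' :: a.reverse) : List Char) == c) := by
  obtain ⟨m, n, hmn, hm, hn⟩ :
      ∃ m n : List Char, c = '.' :: m ++ '.' :: n ∧ ('.' : Char) ∉ m ∧ ('.' : Char) ∉ n := by
    simp only [pvCtlds, List.mem_cons, List.not_mem_nil, or_false] at hc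
    rcases hc with h|h|h|h|h|h|h|h <;> subst h
    · exact ⟨['c','o'], ['u','k'], by decide, by decide, by decide⟩
    · exact ⟨['c','o'], ['n','z'], by decide, by decide, by decide⟩
    · exact ⟨['c','o','m'], ['a','u'], by decide, by decide, by decide⟩
    · exact ⟨['c','o'], ['z','a'], by decide, by decide, by decide⟩
    · exact ⟨['c','o'], ['j','p'], by decide, by decide, by decide⟩
    · exact ⟨['c','o'], ['k','r'], by decide, by decide, by decide⟩
    · exact ⟨['c','o','m'], ['b','r'], by decide, by decide, by decide⟩
    · exact ⟨['c','o'], ['i','n'], by decide, by decide, by decide⟩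
  subst hmn
  rw [Bool.eq_iff_iff]
  simp only [PySem.Chars.endswith, List.isSuffixOf_iff_suffix, beq_iff_eq]
  have hkeyeq : (('.' :: (a2.reverse ++ '.' :: a.reverse) : List Char) = '.' :: m ++ '.' :: n)
      ↔ (a2.reverse = m ∧ a.reverse = n) := by
    rw [show ('.' :: (a2.reverse ++ '.' :: a.reverse) : List Char)
        = '.' :: a2.reverse ++ '.' :: a.reverse by simp]
    exact pv_shape_eq _ _ _ _ (by simpa using ha2) hm
  rw [hkeyeq]
  rw [← List.reverse_prefix]
  have lhs_rev : ('.' :: m ++ '.' :: n : List Char).reverse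
      = n.reverse ++ '.' :: (m.reverse ++ '.' :: []) := by simp
  have rhs_rev : (((b3.reverse ++ '.' :: a2.reverse) ++ '.' :: a.reverse) : List Char).reverse
      = a ++ '.' :: (a2 ++ '.' :: b3) := by simp
  rw [lhs_rev, rhs_rev]
  rw [pv_pref_split n.reverse a (m.reverse ++ '.' :: []) (a2 ++ '.' :: b3)
    (by simpa using hn) ha]
  rw [pv_pref_split m.reverse a2 [] b3 (by simpa using hm) ha2]
  constructor
  · rintro ⟨h1, h2, -⟩
    exact ⟨by rw [← h2]; simp, by rw [← h1]; simp⟩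
  · rintro ⟨h1, h2⟩
    exact ⟨by rw [← h2]; simp, by rw [← h1]; simp, List.nil_prefix⟩

lemma pv_count_ctld (c : List Char) (hc : c ∈ pvCtlds) : List.count '.' c = 2 := by
  simp only [pvCtlds, List.mem_cons, List.not_mem_nil, or_false] at hc
  rcases hc with h|h|h|h|h|h|h|h <;> subst h <;> decide

lemma pv_no_match_of_count (t : List Char) (ht : List.count '.' t ≤ 1) :
    pvCtlds.find? (fun c => PySem.Chars.endswith t c) = none := by
  rw [List.find?_eq_none]
  intro c hc
  simp only [PySem.Chars.endswith, List.isSuffixOf_iff_suffix]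
  intro hsuff
  have := List.Sublist.count_le ('.') hsuff.sublist
  rw [pv_count_ctld c hc] at this
  omega

lemma pv_find_beq (l : List (List Char)) (key : List Char) :
    l.find? (fun c => key == c) = if key ∈ l then some key else none := by
  induction l with
  | nil => simp
  | cons c l ih =>
    by_cases h : key = c
    · subst h; simp
    · have hb : (key == c) = false := by simpa using h
      simp [hb, h, ih]

lemma pv_find_congr (l : List (List Char)) (p q : List Char → Bool)
    (h : ∀ c ∈ l, p c = q c) : l.find? p = l.find? q := by
  induction l with
  | nil => rfl
  | cons c l ih =>
    simp only [List.find?_cons, h c List.mem_cons_self]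
    rw [ih (fun c hc => h c (List.mem_cons_of_mem _ hc))]

lemma pv_no_dot_take (l : List Char) : ('.' : Char) ∉ l.takeWhile pvNotDot := by
  intro hmem
  have := List.mem_takeWhile_imp hmem
  simp [pvNotDot] at this

lemma pv_head_dot (l : List Char) (c : Char) (rest : List Char)
    (h : l.dropWhile pvNotDot = c :: rest) : c = '.' := by
  have w : l.dropWhile pvNotDot ≠ [] := by simp [h]
  have := List.head_dropWhile_not pvNotDot w
  simp only [h, List.head_cons, pvNotDot, decide_eq_false_iff_not, not_not] at this
  exact this

-- the heart: A's body and B's body agree on the (lowered, stripped) character list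
lemma pv_core (t : List Char) :
    (match pvCtlds.find? (fun c => PySem.Chars.endswith t c) with
     | some c => String.ofList c
     | none =>
       match pvRsplitDot1 t with
       | [_, p1] => String.ofList ('.' :: p1)
       | _ => "") =
    (match pvRFindDot t with
     | none => ""
     | some i =>
       match pvRFindDot (t.take i) with
       | some j =>
         let cand := t.drop j
         if pvCompoundB.contains cand then String.ofList cand
         else String.ofList (t.drop i)
       | none => String.ofList (t.drop i)) := by
  rcases h1 : t.reverse.dropWhile pvNotDot with _ | ⟨c1, b'⟩
  · -- no '.' in t at all
    have hnod : ('.' : Char) ∉ t := by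
      intro hm
      have hr : ('.' : Char) ∈ t.reverse := by simpa using hm
      rw [← List.takeWhile_append_dropWhile (p := pvNotDot) (l := t.reverse), h1] at hr
      simp only [List.append_nil] at hr
      exact pv_no_dot_take t.reverse hr
    have hcount : List.count '.' t ≤ 1 := by
      rw [List.count_eq_zero_of_not_mem hnod]; omega
    rw [pv_no_match_of_count t hcount]
    simp [pvRsplitDot1, pvRFindDot, List.span_eq_takeWhile_dropWhile, pv_findIdx, h1]
  · obtain rfl : c1 = '.' := pv_head_dot _ _ _ h1
    have hsplit : t.reverse = t.reverse.takeWhile pvNotDot ++ '.' :: b' := by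
      conv_lhs => rw [← List.takeWhile_append_dropWhile (p := pvNotDot) (l := t.reverse)]
      rw [h1]
    have ha : ('.' : Char) ∉ t.reverse.takeWhile pvNotDot := pv_no_dot_take t.reverse
    have ht : t = b'.reverse ++ '.' :: (t.reverse.takeWhile pvNotDot).reverse := by
      have := congrArg List.reverse hsplit
      simpa using this
    generalize hga : List.takeWhile pvNotDot t.reverse = a at ha ht h1 hsplit
    -- B's i = t.length - 1 - a.length = b'.length
    have hlen : t.length = b'.length + 1 + a.length := by
      rw [ht]; simp; omega
    have hi : pvRFindDot t = some b'.length := by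
      simp only [pvRFindDot, pv_findIdx, h1, hga, Option.map_some]
      congr 1
      omega
    have htake : t.take b'.length = b'.reverse := by
      rw [ht]
      rw [show b'.length = b'.reverse.length by simp]
      exact List.take_left
    have hdrop : t.drop b'.length = '.' :: a.reverse := by
      rw [ht]
      rw [show b'.length = b'.reverse.length by simp]
      exact List.drop_left
    rcases h2 : b'.dropWhile pvNotDot with _ | ⟨c2, b3⟩
    · -- exactly one '.' in t
      have hnod' : ('.' : Char) ∉ b' := by
        intro hm
        rw [← List.takeWhile_append_dropWhile (p := pvNotDot) (l := b'), h2] at hm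
        simp only [List.append_nil] at hm
        exact pv_no_dot_take b' hm
      have hcount : List.count '.' t ≤ 1 := by
        rw [ht, List.count_append, List.count_cons]
        rw [List.count_eq_zero_of_not_mem (by simpa using hnod'),
          List.count_eq_zero_of_not_mem (by simpa using ha)]
        simp
      rw [pv_no_match_of_count t hcount]
      have hj : pvRFindDot (t.take b'.length) = none := by
        simp [pvRFindDot, htake, pv_findIdx, h2]
      simp [pvRsplitDot1, List.span_eq_takeWhile_dropWhile, h1, hga, hi, hj, hdrop]
    · obtain rfl : c2 = '.' := pv_head_dot _ _ _ h2
      have hsplit2 : b' = b'.takeWhile pvNotDot ++ '.' :: b3 := by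
        conv_lhs => rw [← List.takeWhile_append_dropWhile (p := pvNotDot) (l := b')]
        rw [h2]
      have ha2 : ('.' : Char) ∉ b'.takeWhile pvNotDot := pv_no_dot_take b'
      generalize hga2 : List.takeWhile pvNotDot b' = a2 at ha2 hsplit2 h2
      have hlen2 : b'.length = a2.length + 1 + b3.length := by
        rw [hsplit2]; simp; omega
      have hj : pvRFindDot (t.take b'.length) = some b3.length := by
        simp only [pvRFindDot, htake, List.reverse_reverse, pv_findIdx, h2, hga2,
          Option.map_some, List.length_reverse]
        congr 1
        omega
      have ht2 : t = (b3.reverse ++ '.' :: a2.reverse) ++ '.' :: a.reverse := by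
        rw [ht]
        have : b'.reverse = b3.reverse ++ '.' :: a2.reverse := by
          have := congrArg List.reverse hsplit2
          simpa using this
        rw [this, List.append_assoc]
      have hdropj : t.drop b3.length = '.' :: (a2.reverse ++ '.' :: a.reverse) := by
        rw [ht2, List.append_assoc]
        rw [show b3.length = b3.reverse.length by simp]
        rw [List.drop_left]
        simp
      have hfind : pvCtlds.find? (fun c => PySem.Chars.endswith t c)
          = pvCtlds.find? (fun c =>
              ('.' :: (a2.reverse ++ '.' :: a.reverse) : List Char) == c) := by
        apply pv_find_congr
        intro c hc
        rw [ht2]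
        exact pv_ends_iff a a2 b3 ha ha2 c hc
      rw [hfind, pv_find_beq]
      have hcomp : pvCompoundB = pvCtlds := by decide
      by_cases hmem :
          ('.' :: (a2.reverse ++ '.' :: a.reverse) : List Char) ∈ pvCtlds
      · rw [if_pos hmem]
        have hmem' : '.' :: (a2.reverse ++ '.' :: a.reverse) ∈ pvCompoundB := hcomp ▸ hmem
        simp [hi, hj, hdropj, hmem']
      · rw [if_neg hmem]
        have hmem' : '.' :: (a2.reverse ++ '.' :: a.reverse) ∉ pvCompoundB := hcomp ▸ hmem
        simp [pvRsplitDot1, List.span_eq_takeWhile_dropWhile, h1, hga, hi, hj, hdropj, hmem',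
          hdrop]

-- ===== VERDICT (by name: the statement is the Claim_ definition above) =====
theorem get_domain_tld_spec : Claim_equal_get_domain_tld := by
  intro domain _
  unfold Spec_get_domain_tld get_domain_tld get_domain_tld_alt
  by_cases h : domain.toList = []
  · rw [if_pos h, h]
    rfl
  · rw [if_neg h]
    exact pv_core (PySem.Chars.strip (PySem.Chars.lower domain.toList))
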